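-- pv_equiv track=rewrite | github.com/dhruvmanila/advent-of-code | python/year2018/sol01.py | duplicate_frequency
-- ===== SOURCE A (Python) =====
-- from itertools import cycle
--
-- def duplicate_frequency(changes: list[int]) -> int:
--     frequency = 0
--     seen = {frequency}
--     for change in cycle(changes):
--         frequency += change
--         if frequency in seen:
--             break
--         seen.add(frequency)
--     return frequency
-- ===== SOURCE B (Python) =====
-- def duplicate_frequency(changes: list[int]) -> int:
--     # Analytic solution: the repeat happens at a frequency p[j] + d*total that
--     # equals an earlier prefix frequency; pick the candidate with the earliest
--     # time, i.e. lexicographically smallest (d, j).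
--     if not changes:
--         return 0
--     prefix = [0]
--     total = 0
--     for change in changes:
--         total += change
--         prefix.append(total)
--     n = len(changes)
--     best = None  # (d, j) with the repeated value prefix[j] + d * total
--     for j in range(1, n + 1):
--         for i in range(n + 1):
--             diff = prefix[i] - prefix[j]
--             if diff == 0:
--                 if i >= j:
--                     continue
--                 d = 0
--             elif total != 0 and diff % total == 0 and diff // total >= 1:
--                 d = diff // total
--             else:
--                 continue
--             if best is None or (d, j) < best:
--                 best = (d, j)
--     if best is None:
--         raise ValueError("the frequency never repeats")
--     d, j = best
--     return prefix[j] + d * total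
-- ===== Notes on version B (the rewrite author's own statement) =====
-- stated objective: alternative
-- what changed: A simulates the cyclic walk step by step with a seen-set until a frequency repeats; B computes one pass of prefix sums and finds the repeated frequency analytically, minimising (cycle count d, offset j) over prefix-sum pairs whose difference is a nonnegative multiple of the total.
import Mathlib
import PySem

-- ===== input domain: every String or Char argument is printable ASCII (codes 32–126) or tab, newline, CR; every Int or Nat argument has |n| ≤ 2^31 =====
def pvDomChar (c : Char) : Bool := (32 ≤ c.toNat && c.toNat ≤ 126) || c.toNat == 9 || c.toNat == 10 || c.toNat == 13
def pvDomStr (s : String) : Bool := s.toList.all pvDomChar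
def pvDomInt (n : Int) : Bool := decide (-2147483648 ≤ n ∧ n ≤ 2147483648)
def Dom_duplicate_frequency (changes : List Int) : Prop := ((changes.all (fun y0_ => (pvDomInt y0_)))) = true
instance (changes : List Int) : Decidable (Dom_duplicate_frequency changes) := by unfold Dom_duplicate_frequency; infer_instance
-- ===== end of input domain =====

-- B replaces A's step-by-step cyclic simulation by a closed-form search: the repeated
-- frequency is the earliest prefix sum p[j] + d*total that revisits an earlier prefix
-- sum, found by minimising (d, j) over prefix-sum pairs (objective: alternative).

-- ===== PORT A =====
-- fuel that provably exceeds the number of loop iterations A performs whenever A terminates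
def pvFuelA (changes : List Int) : Nat :=
  (changes.length + 1) * (2 * (changes.map Int.natAbs).sum + 2)

-- 'for change in cycle(changes)': one call per iteration, k is the current position in changes
def pvLoopA (changes : List Int) : Nat → Nat → Int → PySem.Set Int → Int
  | 0, _, frequency, _ => frequency
  | fuel+1, k, frequency, seen =>
      let change := changes.getD k 0
      let frequency' := frequency + change
      if PySem.Set.contains seen frequency' then frequency'
      else pvLoopA changes fuel ((k+1) % changes.length) frequency' (PySem.Set.add seen frequency')

-- cycle([]) yields nothing, so the loop body never runs and A returns frequency = 0
def duplicate_frequency (changes : List Int) : Int :=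
  if changes = [] then 0
  else pvLoopA changes (pvFuelA changes) 0 0 (PySem.Set.ofList [0])

-- ===== PORT B =====
-- candidate step count d such that prefix[i] = prefix[j] + d*total witnesses a repeat
def pvCand (pre : List Int) (total : Int) (j i : Nat) : Option Int :=
  let diff := pre.getD i 0 - pre.getD j 0
  if diff = 0 then (if i < j then some 0 else none)
  else if total ≠ 0 ∧ PySem.Int.mod diff total = 0 ∧ 1 ≤ PySem.Int.floordiv diff total
       then some (PySem.Int.floordiv diff total) else none

-- 'if best is None or (d, j) < best: best = (d, j)'
def pvBetter (d : Int) (j : Nat) (best : Option (Int × Nat)) : Option (Int × Nat) :=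
  match best with
  | none => some (d, j)
  | some b => if d < b.1 ∨ (d = b.1 ∧ j < b.2) then some (d, j) else best

def duplicate_frequency_alt (changes : List Int) : Int :=
  if changes = [] then 0
  else
    let pt := changes.foldl (fun (st : List Int × Int) c => (st.1 ++ [st.2 + c], st.2 + c)) ([0], 0)
    let pref := pt.1
    let total := pt.2
    let n := changes.length
    let best := (List.range' 1 n).foldl (fun best j =>
        (List.range (n+1)).foldl (fun best i =>
          match pvCand pref total j i with
          | none => best
          | some d => pvBetter d j best) best) none
    match best with
    | none => 0   -- Python raises ValueError here; Pre_ excludes these inputs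
    | some dj => pref.getD dj.2 0 + dj.1 * total

-- ===== PRECONDITION & SPEC =====
-- prefix sum of the first k changes
def pvP (xs : List Int) (k : Nat) : Int := (xs.take k).sum

-- Pre_ excludes exactly the inputs on which A loops forever (the frequency never repeats):
-- A terminates iff changes is empty or some pair of prefix sums differs by a
-- nonnegative multiple of the total (with index order i < j when the multiple is 0).
def Pre_duplicate_frequency (changes : List Int) : Prop :=
  changes = [] ∨ ∃ j ∈ List.range (changes.length + 1), ∃ i ∈ List.range (changes.length + 1),
    1 ≤ j ∧ ((pvP changes i = pvP changes j ∧ i < j) ∨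
      (changes.sum ≠ 0 ∧ PySem.Int.mod (pvP changes i - pvP changes j) changes.sum = 0 ∧
        1 ≤ PySem.Int.floordiv (pvP changes i - pvP changes j) changes.sum))
instance (changes : List Int) : Decidable (Pre_duplicate_frequency changes) := by
  unfold Pre_duplicate_frequency; infer_instance

def pvWitness_duplicate_frequency : List Int := [1, -1]

def Spec_duplicate_frequency (changes : List Int) (out : Int) : Prop := out = duplicate_frequency_alt changes
instance (changes : List Int) (out : Int) : Decidable (Spec_duplicate_frequency changes out) := by unfold Spec_duplicate_frequency; infer_instance

-- ===== CLAIM (what is proved, stated in full; the proofs are below) =====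
def Claim_equal_duplicate_frequency : Prop := ∀ (changes : List Int), Dom_duplicate_frequency changes → Pre_duplicate_frequency changes → Spec_duplicate_frequency changes (duplicate_frequency changes)

-- ===== LEMMAS AND PROOFS =====

-- the frequency after t iterations of A's loop
def pvV (xs : List Int) : Nat → Int
  | 0 => 0
  | t+1 => pvV xs t + xs.getD (t % xs.length) 0

-- a repeat happens at iteration u
def pvCol (xs : List Int) (u : Nat) : Prop := ∃ s, s < u ∧ pvV xs s = pvV xs u

-- strict lexicographic order on (d, j) candidates, Python's tuple '<'
def pvLexLt (a b : Int × Nat) : Prop := a.1 < b.1 ∨ (a.1 = b.1 ∧ a.2 < b.2)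

-- 'best' is the minimum of the candidate set S
def pvMinOf (S : Int × Nat → Prop) : Option (Int × Nat) → Prop
  | none => ∀ p, ¬ S p
  | some m => S m ∧ ∀ p, S p → ¬ pvLexLt p m

-- the list of prefix sums B builds
def pvPfx (xs : List Int) : List Int := (List.range (xs.length + 1)).map (fun k => pvP xs k)

-- the set of candidate pairs B scans
def pvCands (xs : List Int) (p : Int × Nat) : Prop :=
  ∃ j ∈ List.range' 1 xs.length, ∃ i ∈ List.range (xs.length + 1),
    pvCand (pvPfx xs) xs.sum j i = some p.1 ∧ p.2 = j

lemma pvP_zero (xs : List Int) : pvP xs 0 = 0 := rfl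

lemma pvP_succ (xs : List Int) (k : Nat) (h : k < xs.length) :
    pvP xs (k+1) = pvP xs k + xs.getD k 0 := by
  rw [pvP, pvP, List.take_add_one, List.getElem?_eq_getElem h]
  rw [List.getD_eq_getElem?_getD, List.getElem?_eq_getElem h]
  simp only [Option.toList_some, List.sum_append, List.sum_cons, List.sum_nil, Option.getD_some]
  ring

lemma pvP_len (xs : List Int) : pvP xs xs.length = xs.sum := by
  simp [pvP]

lemma pvV_eq_pvP (xs : List Int) (t : Nat) (h : t ≤ xs.length) :
    pvV xs t = pvP xs t := by
  induction t with
  | zero => simp [pvV, pvP]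
  | succ t ih =>
    have ht : t < xs.length := by omega
    rw [pvV, Nat.mod_eq_of_lt ht, ih (by omega), pvP_succ xs t ht]

lemma pvV_add_len (xs : List Int) (t : Nat) :
    pvV xs (t + xs.length) = pvV xs t + xs.sum := by
  induction t with
  | zero =>
    have := pvV_eq_pvP xs xs.length le_rfl
    simp [pvV, this, pvP]
  | succ t ih =>
    have : t + 1 + xs.length = (t + xs.length) + 1 := by omega
    rw [this, pvV, ih, Nat.add_mod_right, pvV]
    ring

lemma pvV_form (xs : List Int) (j : Nat) (h : j ≤ xs.length) (c : Nat) :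
    pvV xs (c * xs.length + j) = (c : Int) * xs.sum + pvP xs j := by
  induction c with
  | zero => simpa using pvV_eq_pvP xs j h
  | succ c ih =>
    have : (c+1) * xs.length + j = (c * xs.length + j) + xs.length := by ring
    rw [this, pvV_add_len xs, ih]
    push_cast; ring

lemma pvNatAbs_sum_le (l : List Int) : l.sum.natAbs ≤ (l.map Int.natAbs).sum := by
  induction l with
  | nil => simp
  | cons a l ih =>
    simp only [List.sum_cons, List.map_cons]
    calc (a + l.sum).natAbs ≤ a.natAbs + l.sum.natAbs := Int.natAbs_add_le a l.sum
    _ ≤ a.natAbs + (l.map Int.natAbs).sum := by omega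

lemma pvP_abs (xs : List Int) (k : Nat) :
    (pvP xs k).natAbs ≤ (xs.map Int.natAbs).sum := by
  calc (pvP xs k).natAbs ≤ ((xs.take k).map Int.natAbs).sum := pvNatAbs_sum_le _
    _ ≤ (xs.map Int.natAbs).sum :=
      ((List.take_sublist k xs).map Int.natAbs).sum_le_sum (by simp)

lemma pvPfx_getD (xs : List Int) (k : Nat) (h : k ≤ xs.length) :
    (pvPfx xs).getD k 0 = pvP xs k := by
  rw [pvPfx, List.getD_eq_getElem?_getD, List.getElem?_map, List.getElem?_range (by omega)]
  simp

lemma pvFold_prefix (xs : List Int) : ∀ (pref : List Int) (t : Int),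
    xs.foldl (fun (st : List Int × Int) c => (st.1 ++ [st.2 + c], st.2 + c)) (pref, t)
    = (pref ++ (List.range xs.length).map (fun k => t + pvP xs (k+1)), t + xs.sum) := by
  induction xs with
  | nil => intro pref t; simp
  | cons c cs ih =>
    intro pref t
    rw [List.foldl_cons, ih]
    have h1 : pvP (c :: cs) 1 = c := by simp [pvP]
    have h2 : ∀ k : Nat, pvP (c :: cs) (k + 1 + 1) = c + pvP cs (k + 1) := by
      intro k; simp [pvP]
    refine Prod.ext ?_ ?_
    · simp only [List.length_cons, List.range_succ_eq_map, List.map_cons, List.map_map]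
      simp only [Function.comp_def, h1, h2]
      simp [add_assoc, List.append_assoc]
    · simp [List.sum_cons, add_assoc]

lemma pvFold_prefix' (xs : List Int) :
    xs.foldl (fun (st : List Int × Int) c => (st.1 ++ [st.2 + c], st.2 + c)) ([0], 0)
    = (pvPfx xs, xs.sum) := by
  rw [pvFold_prefix]
  refine Prod.ext ?_ (by simp)
  simp only [pvPfx, List.range_succ_eq_map, List.map_cons, List.map_map]
  simp [pvP, Function.comp_def]

lemma pvLex_trans (p q r : Int × Nat) (h1 : pvLexLt p q) (h2 : pvLexLt q r) : pvLexLt p r := by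
  rcases p with ⟨a, b⟩; rcases q with ⟨c, d⟩; rcases r with ⟨e, f⟩
  simp only [pvLexLt] at *
  omega

lemma pvMin_congr (S S' : Int × Nat → Prop) (hSS : ∀ p, S p ↔ S' p) (b : Option (Int × Nat))
    (h : pvMinOf S b) : pvMinOf S' b := by
  cases b with
  | none => intro p hp; exact h p ((hSS p).mpr hp)
  | some m => exact ⟨(hSS m).mp h.1, fun p hp => h.2 p ((hSS p).mpr hp)⟩

-- minimality is preserved by one update step of B's inner loop
lemma pvMin_step (pre : List Int) (tot : Int) (j i : Nat) (S : Int × Nat → Prop)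
    (b : Option (Int × Nat)) (h : pvMinOf S b) :
    pvMinOf (fun p => S p ∨ (pvCand pre tot j i = some p.1 ∧ p.2 = j))
      (match pvCand pre tot j i with
       | none => b
       | some d => pvBetter d j b) := by
  cases hc : pvCand pre tot j i with
  | none =>
    refine pvMin_congr S _ ?_ b h
    intro p; constructor
    · exact Or.inl
    · rintro (hp | ⟨hs, _⟩); · exact hp
      · exact absurd hs.symm (by simp)
  | some d =>
    cases b with
    | none =>
      simp only [pvBetter, pvMinOf]
      refine ⟨Or.inr (by simp), ?_⟩
      rintro p hp
      rcases hp with hp | ⟨hs, hj⟩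
      · exact absurd hp (h p)
      · rcases p with ⟨pd, pj⟩
        cases hs
        subst hj
        simp [pvLexLt]
    | some m =>
      obtain ⟨hm, hmin⟩ := h
      simp only [pvBetter]
      by_cases hlt : d < m.1 ∨ (d = m.1 ∧ j < m.2)
      · rw [if_pos hlt]
        refine ⟨Or.inr ⟨rfl, rfl⟩, ?_⟩
        rintro p (hp | ⟨hs, hj⟩)
        · intro hcon
          exact hmin p hp (pvLex_trans p (d, j) m hcon hlt)
        · rcases p with ⟨pd, pj⟩
          cases hs
          subst hj
          simp [pvLexLt]
      · rw [if_neg hlt]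
        refine ⟨Or.inl hm, ?_⟩
        rintro p (hp | ⟨hs, hj⟩)
        · exact hmin p hp
        · rcases p with ⟨pd, pj⟩
          cases hs
          subst hj
          simp only [pvLexLt, not_or, not_and, not_lt] at hlt ⊢
          omega

lemma pvMin_inner (pre : List Int) (tot : Int) (j : Nat) :
    ∀ (is : List Nat) (b : Option (Int × Nat)) (S : Int × Nat → Prop), pvMinOf S b →
    pvMinOf (fun p => S p ∨ ∃ i ∈ is, pvCand pre tot j i = some p.1 ∧ p.2 = j)
      (is.foldl (fun best i =>
        match pvCand pre tot j i with
        | none => best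
        | some d => pvBetter d j best) b) := by
  intro is
  induction is with
  | nil => intro b S h; simpa using pvMin_congr S _ (by simp) b h
  | cons i is ih =>
    intro b S h
    rw [List.foldl_cons]
    have h1 := pvMin_step pre tot j i S b h
    have h2 := ih _ _ h1
    refine pvMin_congr _ _ ?_ _ h2
    intro p
    simp only [List.mem_cons]
    constructor
    · rintro ((hp | hone) | ⟨i', hi', hc⟩)
      · exact Or.inl hp
      · exact Or.inr ⟨i, Or.inl rfl, hone⟩
      · exact Or.inr ⟨i', Or.inr hi', hc⟩
    · rintro (hp | ⟨i', (rfl | hi'), hc⟩)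
      · exact Or.inl (Or.inl hp)
      · exact Or.inl (Or.inr hc)
      · exact Or.inr ⟨i', hi', hc⟩

lemma pvMin_outer (pre : List Int) (tot : Int) (is : List Nat) :
    ∀ (js : List Nat) (b : Option (Int × Nat)) (S : Int × Nat → Prop), pvMinOf S b →
    pvMinOf (fun p => S p ∨ ∃ j ∈ js, ∃ i ∈ is, pvCand pre tot j i = some p.1 ∧ p.2 = j)
      (js.foldl (fun best j => is.foldl (fun best i =>
        match pvCand pre tot j i with
        | none => best
        | some d => pvBetter d j best) best) b) := by
  intro js
  induction js with
  | nil => intro b S h; simpa using pvMin_congr S _ (by simp) b h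
  | cons j js ih =>
    intro b S h
    rw [List.foldl_cons]
    have h1 := pvMin_inner pre tot j is b S h
    have h2 := ih _ _ h1
    refine pvMin_congr _ _ ?_ _ h2
    intro p
    simp only [List.mem_cons]
    constructor
    · rintro ((hp | hone) | ⟨j', hj', hc⟩)
      · exact Or.inl hp
      · exact Or.inr ⟨j, Or.inl rfl, hone⟩
      · exact Or.inr ⟨j', Or.inr hj', hc⟩
    · rintro (hp | ⟨j', (rfl | hj'), hc⟩)
      · exact Or.inl (Or.inl hp)
      · exact Or.inl (Or.inr hc)
      · exact Or.inr ⟨j', hj', hc⟩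

-- semantics of a candidate
lemma pvCand_sound (xs : List Int) (j i : Nat) (hj : j ≤ xs.length) (hi : i ≤ xs.length) (d : Int)
    (h : pvCand (pvPfx xs) xs.sum j i = some d) :
    0 ≤ d ∧ pvP xs i - pvP xs j = d * xs.sum ∧ (1 ≤ d ∨ (d = 0 ∧ i < j)) := by
  rw [pvCand] at h
  simp only [pvPfx_getD xs i hi, pvPfx_getD xs j hj] at h
  split_ifs at h with h0 hlt hdvd
  · cases h
    refine ⟨le_refl 0, ?_, Or.inr ⟨rfl, hlt⟩⟩
    rw [zero_mul]; exact h0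
  · obtain ⟨hs, hmod, hfl⟩ := hdvd
    cases h
    have := PySem.Int.floordiv_mul_add_mod (pvP xs i - pvP xs j) xs.sum
    rw [hmod, add_zero] at this
    exact ⟨by omega, this.symm, Or.inl hfl⟩

lemma pvCand_complete (xs : List Int) (j i : Nat) (hj : j ≤ xs.length) (hi : i ≤ xs.length) (d : Int)
    (hd : pvP xs i - pvP xs j = d * xs.sum)
    (hc : (1 ≤ d ∧ pvP xs i - pvP xs j ≠ 0) ∨ (d = 0 ∧ i < j)) :
    pvCand (pvPfx xs) xs.sum j i = some d := by
  rw [pvCand]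
  simp only [pvPfx_getD xs i hi, pvPfx_getD xs j hj]
  rcases hc with ⟨hd1, hne0⟩ | ⟨hd0, hij⟩
  · have hs : xs.sum ≠ 0 := by
      intro h0; rw [h0, mul_zero] at hd; exact hne0 hd
    have hmod : PySem.Int.mod (pvP xs i - pvP xs j) xs.sum = 0 :=
      (PySem.Int.mod_eq_zero_iff_dvd _ _).mpr ⟨d, by rw [hd, mul_comm]⟩
    have hfl : PySem.Int.floordiv (pvP xs i - pvP xs j) xs.sum = d := by
      have h1 := PySem.Int.floordiv_mul_add_mod (pvP xs i - pvP xs j) xs.sum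
      rw [hmod, add_zero] at h1
      exact mul_right_cancel₀ hs (h1.trans hd)
    rw [if_neg hne0, if_pos ⟨hs, hmod, by omega⟩, hfl]
  · subst hd0
    rw [mul_comm, mul_zero] at hd
    rw [if_pos hd, if_pos hij]

-- every candidate yields a collision at time d*n + j
lemma pvCand_col (xs : List Int) (hne : xs ≠ []) (j i : Nat) (hj1 : 1 ≤ j) (hj : j ≤ xs.length)
    (hi : i ≤ xs.length) (d : Int) (hd0 : 0 ≤ d)
    (hd : pvP xs i - pvP xs j = d * xs.sum) (hc : 1 ≤ d ∨ (d = 0 ∧ i < j)) :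
    pvCol xs (d.toNat * xs.length + j) := by
  have hn : 1 ≤ xs.length := List.length_pos_iff.mpr hne
  refine ⟨i, ?_, ?_⟩
  · rcases hc with hd1 | ⟨hd0, hij⟩
    · have : 1 ≤ d.toNat := by omega
      have := Nat.mul_le_mul_right xs.length this
      omega
    · subst hd0; simp only [Int.toNat_zero, Nat.zero_mul, Nat.zero_add]; omega
  · rw [pvV_eq_pvP xs i hi, pvV_form xs j hj d.toNat,
      Int.toNat_of_nonneg hd0]
    omega

-- decomposition of a positive time
lemma pvDecomp (n u : Nat) (hn : 1 ≤ n) (hu : 1 ≤ u) :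
    ∃ c j, 1 ≤ j ∧ j ≤ n ∧ u = c * n + j := by
  have e1 := Nat.div_add_mod (u-1) n
  have e2 : (u-1) % n < n := Nat.mod_lt _ (by omega)
  refine ⟨(u-1)/n, (u-1)%n + 1, by omega, by omega, ?_⟩
  have e3 : (u-1)/n * n + ((u-1)%n + 1) = (n * ((u-1)/n) + (u-1)%n) + 1 := by ring
  rw [e3, e1, Nat.sub_add_cancel hu]

-- every collision yields a candidate pair at a time ≤ u
lemma pvCol_cand (xs : List Int) (hne : xs ≠ []) (u : Nat) (h : pvCol xs u) :
    ∃ p, pvCands xs p ∧ 0 ≤ p.1 ∧ p.1.toNat * xs.length + p.2 ≤ u := by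
  have hn : 1 ≤ xs.length := List.length_pos_iff.mpr hne
  obtain ⟨s, hsu, heq⟩ := h
  have hu1 : 1 ≤ u := by omega
  obtain ⟨c, j, hj1, hjn, hcj⟩ := pvDecomp xs.length u hn hu1
  -- decompose the earlier time s as well
  obtain ⟨c', i, hin, hci, hvi⟩ :
      ∃ c' i, i ≤ xs.length ∧ s = c' * xs.length + i ∧
        pvV xs s = (c' : Int) * xs.sum + pvP xs i := by
    rcases Nat.eq_zero_or_pos s with rfl | hs1
    · exact ⟨0, 0, by omega, by omega, by simp [pvV, pvP]⟩
    · obtain ⟨c', i, hi1, hin, hci⟩ := pvDecomp xs.length s hn hs1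
      exact ⟨c', i, hin, hci, by rw [hci]; exact pvV_form xs i hin c'⟩
  have hvu : pvV xs u = (c : Int) * xs.sum + pvP xs j := by
    rw [hcj]; exact pvV_form xs j hjn c
  -- the earlier time lies in an earlier or the same cycle
  have hcc : c' ≤ c := by
    by_contra hgt
    push_neg at hgt
    have h1 : (c + 1) * xs.length ≤ c' * xs.length := Nat.mul_le_mul_right _ (by omega)
    have h2 : (c + 1) * xs.length = c * xs.length + xs.length := by ring
    omega
  have hdiff : pvP xs i - pvP xs j = ((c - c' : Nat) : Int) * xs.sum := by
    rw [hvi, hvu] at heq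
    have : ((c - c' : Nat) : Int) = (c : Int) - (c' : Int) := by
      push_cast [Nat.cast_sub hcc]; ring
    rw [this]; linarith [heq]
  rcases Nat.eq_zero_or_pos (c - c') with hd0 | hd1
  · -- same cycle: i < j and pvP i = pvP j
    have hcc' : c' = c := by omega
    have hij : i < j := by
      have e : c' * xs.length = c * xs.length := by rw [hcc']
      omega
    have hpp : pvP xs i = pvP xs j := by
      rw [hd0] at hdiff; simp at hdiff; omega
    refine ⟨(0, j), ⟨j, ?_, i, ?_, ?_, rfl⟩, by omega, ?_⟩
    · rw [List.mem_range'_1]; exact ⟨by omega, by omega⟩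
    · rw [List.mem_range]; omega
    · exact pvCand_complete xs j i hjn hin 0 (by rw [zero_mul]; omega) (Or.inr ⟨rfl, hij⟩)
    · simp only [Int.toNat_zero, Nat.zero_mul, Nat.zero_add]; omega
  · by_cases hz : pvP xs i - pvP xs j = 0
    · -- the total must be 0: use the pair (0, n) instead
      have hsum : xs.sum = 0 := by
        rw [hz] at hdiff
        have : ((c - c' : Nat) : Int) ≠ 0 := by
          simp only [ne_eq, Nat.cast_eq_zero]; omega
        exact (mul_eq_zero.mp hdiff.symm).resolve_left this
      refine ⟨(0, xs.length), ⟨xs.length, ?_, 0, ?_, ?_, rfl⟩, by omega, ?_⟩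
      · rw [List.mem_range'_1]; exact ⟨by omega, by omega⟩
      · rw [List.mem_range]; omega
      · refine pvCand_complete xs xs.length 0 le_rfl (by omega) 0 ?_ (Or.inr ⟨rfl, by omega⟩)
        rw [zero_mul, pvP_zero, pvP_len, hsum]; ring
      · have hc1 : 1 ≤ c := by omega
        have : 1 * xs.length ≤ c * xs.length := Nat.mul_le_mul_right _ hc1
        simp only [Int.toNat_zero, Nat.zero_mul, Nat.zero_add]; omega
    · -- a genuine multi-cycle repeat
      refine ⟨(((c - c' : Nat) : Int), j), ⟨j, ?_, i, ?_, ?_, rfl⟩, by omega, ?_⟩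
      · rw [List.mem_range'_1]; exact ⟨by omega, by omega⟩
      · rw [List.mem_range]; omega
      · exact pvCand_complete xs j i hjn hin _ hdiff (Or.inl ⟨by simp only; exact_mod_cast hd1, hz⟩)
      · rw [Int.toNat_natCast]
        have : (c - c') * xs.length ≤ c * xs.length := Nat.mul_le_mul_right _ (by omega)
        omega

-- candidate keys order ↔ time order
lemma pvKey_mono (n : Nat) (d d' : Int) (j j' : Nat) (hd : 0 ≤ d) (hd' : 0 ≤ d')
    (hj : 1 ≤ j) (hjn : j ≤ n) (hj' : 1 ≤ j') (hj'n : j' ≤ n)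
    (h : ¬ pvLexLt (d', j') (d, j)) : d.toNat * n + j ≤ d'.toNat * n + j' := by
  simp only [pvLexLt, not_or, not_and, not_lt] at h
  rcases lt_or_ge d d' with hdd | hdd
  · have h1 : d.toNat + 1 ≤ d'.toNat := by omega
    calc d.toNat * n + j ≤ d.toNat * n + n := by omega
      _ = (d.toNat + 1) * n := by ring
      _ ≤ d'.toNat * n := Nat.mul_le_mul_right n h1
      _ ≤ d'.toNat * n + j' := Nat.le_add_right _ _
  · have : d = d' := by omega
    subst this
    have := h.2 rfl
    omega

-- A's loop returns the value at the first collision time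
lemma pvLoopA_run (xs : List Int) (hne : xs ≠ []) (T : Nat)
    (hT : pvCol xs T) (hmin : ∀ u, u < T → ¬ pvCol xs u) :
    ∀ (fuel t : Nat) (seen : PySem.Set Int),
      (∀ z, PySem.Set.contains seen z = true ↔ ∃ s ≤ t, pvV xs s = z) →
      (∀ u, u ≤ t → ¬ pvCol xs u) →
      T ≤ t + fuel →
      pvLoopA xs fuel (t % xs.length) (pvV xs t) seen = pvV xs T := by
  intro fuel
  induction fuel with
  | zero =>
    intro t seen hseen hnone hTle
    exact absurd hT (hnone T (by omega))
  | succ fuel ih =>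
    intro t seen hseen hnone hTle
    rw [pvLoopA]
    have hv1 : pvV xs t + xs.getD (t % xs.length) 0 = pvV xs (t+1) := rfl
    simp only [hv1]
    split
    · next hmem =>
      obtain ⟨sx, hsxle, hveq⟩ := (hseen _).mp hmem
      have hcol : pvCol xs (t+1) := ⟨sx, by omega, hveq⟩
      have hTeq : T = t + 1 := by
        rcases Nat.lt_trichotomy T (t+1) with hlt | heq | hgt
        · exact absurd hT (hnone T (by omega))
        · exact heq
        · exact absurd hcol (hmin (t+1) hgt)
      rw [hTeq]
    · next hmem =>
      have hmod : (t % xs.length + 1) % xs.length = (t + 1) % xs.length := by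
        conv_rhs => rw [← Nat.div_add_mod t xs.length, Nat.add_assoc, Nat.mul_add_mod]
      rw [hmod]
      apply ih (t+1)
      · intro z
        rw [PySem.Set.contains_iff, PySem.Set.mem_add]
        constructor
        · rintro (hz | rfl)
          · obtain ⟨sx, hsxle, hveq⟩ := (hseen z).mp ((PySem.Set.contains_iff seen z).mpr hz)
            exact ⟨sx, by omega, hveq⟩
          · exact ⟨t+1, le_rfl, rfl⟩
        · rintro ⟨sx, hsxle, hveq⟩
          rcases Nat.lt_or_ge sx (t+1) with hlt | hge
          · exact Or.inl ((PySem.Set.contains_iff seen z).mp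
              ((hseen z).mpr ⟨sx, by omega, hveq⟩))
          · have : sx = t+1 := by omega
            subst this; exact Or.inr hveq.symm
      · intro u hu
        rcases Nat.lt_or_ge u (t+1) with hlt | hge
        · exact hnone u (by omega)
        · have hu1 : u = t + 1 := by omega
          subst hu1
          rintro ⟨sx, hsx, hveq⟩
          exact hmem ((hseen _).mpr ⟨sx, by omega, hveq⟩)
      · omega

lemma pvA_result (xs : List Int) (hne : xs ≠ []) (T : Nat)
    (hT : pvCol xs T) (hmin : ∀ u, u < T → ¬ pvCol xs u) (hfuel : T ≤ pvFuelA xs) :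
    duplicate_frequency xs = pvV xs T := by
  rw [duplicate_frequency, if_neg hne]
  have h0 : (0 : Nat) % xs.length = 0 := Nat.zero_mod _
  have := pvLoopA_run xs hne T hT hmin (pvFuelA xs) 0 (PySem.Set.ofList [0])
    (by
      intro z
      rw [PySem.Set.contains_iff, PySem.Set.mem_ofList]
      constructor
      · intro hz
        simp only [List.mem_singleton] at hz
        exact ⟨0, le_rfl, hz.symm⟩
      · rintro ⟨sx, hsxle, hveq⟩
        have : sx = 0 := by omega
        subst this
        simp [← hveq, pvV])
    (by
      intro u hu
      have : u = 0 := by omega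
      subst this
      rintro ⟨sx, hsx, _⟩
      omega)
    (by omega)
  rw [h0] at this
  exact this

-- Pre_ yields a collision whose time is within the fuel budget
lemma pvPre_col (xs : List Int) (hne : xs ≠ []) (h : Pre_duplicate_frequency xs) :
    ∃ u, pvCol xs u ∧ u ≤ pvFuelA xs := by
  have hn : 1 ≤ xs.length := List.length_pos_iff.mpr hne
  rcases h with rfl | ⟨j, hjmem, i, himem, hj1, hcase⟩
  · exact absurd rfl hne
  rw [List.mem_range] at hjmem himem
  have hjn : j ≤ xs.length := by omega
  have hin : i ≤ xs.length := by omega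
  have hA := pvP_abs xs i
  have hB := pvP_abs xs j
  have hfa : xs.length ≤ pvFuelA xs := by
    rw [pvFuelA]
    calc xs.length ≤ (xs.length + 1) * 1 := by omega
      _ ≤ (xs.length + 1) * (2 * (xs.map Int.natAbs).sum + 2) :=
          Nat.mul_le_mul_left _ (by omega)
  rcases hcase with ⟨hpp, hij⟩ | ⟨hs, hmod, hfl⟩
  · refine ⟨j, ⟨i, hij, ?_⟩, by omega⟩
    rw [pvV_eq_pvP xs i hin, pvV_eq_pvP xs j hjn, hpp]
  · set d := PySem.Int.floordiv (pvP xs i - pvP xs j) xs.sum with hd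
    have hdm := PySem.Int.floordiv_mul_add_mod (pvP xs i - pvP xs j) xs.sum
    rw [hmod, add_zero, ← hd] at hdm
    have hcol := pvCand_col xs hne j i hj1 hjn hin d (by omega) hdm.symm (Or.inl hfl)
    refine ⟨d.toNat * xs.length + j, hcol, ?_⟩
    -- bound the cycle count d by the total variation of the prefix sums
    have hd_abs : d.toNat ≤ 2 * (xs.map Int.natAbs).sum := by
      have h1 : d.natAbs * xs.sum.natAbs = (pvP xs i - pvP xs j).natAbs := by
        rw [← Int.natAbs_mul, hdm]
      have h2 : xs.sum.natAbs ≥ 1 := by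
        rcases Nat.eq_zero_or_pos xs.sum.natAbs with h0 | h0
        · exact absurd (Int.natAbs_eq_zero.mp h0) hs
        · omega
      have h3 : d.natAbs ≤ (pvP xs i - pvP xs j).natAbs := by
        calc d.natAbs = d.natAbs * 1 := by omega
          _ ≤ d.natAbs * xs.sum.natAbs := Nat.mul_le_mul_left _ h2
          _ = (pvP xs i - pvP xs j).natAbs := h1
      have h4 : (pvP xs i - pvP xs j).natAbs ≤ (pvP xs i).natAbs + (pvP xs j).natAbs :=
        Int.natAbs_sub_le _ _
      have h5 : d.toNat ≤ d.natAbs := by omega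
      omega
    set A := (xs.map Int.natAbs).sum with hAdef
    set n := xs.length with hndef
    have h6 : d.toNat * n ≤ 2 * (A * n) := by
      calc d.toNat * n ≤ (2 * A) * n := Nat.mul_le_mul_right _ hd_abs
        _ = 2 * (A * n) := by ring
    have h7 : pvFuelA xs = 2 * (A * n) + 2 * n + 2 * A + 2 := by
      rw [pvFuelA, ← hAdef, ← hndef]; ring
    omega

lemma pvB_fold (xs : List Int) (hne : xs ≠ []) :
    pvMinOf (pvCands xs)
      ((List.range' 1 xs.length).foldl (fun best j =>
        (List.range (xs.length+1)).foldl (fun best i =>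
          match pvCand (pvPfx xs) xs.sum j i with
          | none => best
          | some d => pvBetter d j best) best) none) := by
  have h0 : pvMinOf (fun _ => False) none := fun p hp => hp
  have h1 := pvMin_outer (pvPfx xs) xs.sum (List.range (xs.length+1))
    (List.range' 1 xs.length) none _ h0
  refine pvMin_congr _ _ ?_ _ h1
  intro p
  rw [pvCands]
  constructor
  · rintro (hf | h); · exact hf.elim
    · exact h
  · exact Or.inr

-- B's result is the prefix value at the lexicographically least candidate
lemma pvB_result (xs : List Int) (hne : xs ≠ []) (q : Int × Nat) (hq : pvCands xs q) :
    ∃ d j, pvMinOf (pvCands xs) (some (d, j)) ∧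
      duplicate_frequency_alt xs = pvP xs j + d * xs.sum := by
  have hf := pvB_fold xs hne
  cases hbv : ((List.range' 1 xs.length).foldl (fun best j =>
        (List.range (xs.length+1)).foldl (fun best i =>
          match pvCand (pvPfx xs) xs.sum j i with
          | none => best
          | some d => pvBetter d j best) best) none) with
  | none =>
    rw [hbv] at hf
    exact absurd hq (hf q)
  | some m =>
    rw [hbv] at hf
    obtain ⟨j0, hj0mem, i0, hi0mem, hcand0, hj0⟩ := hf.1
    rw [List.mem_range'_1] at hj0mem
    have hm2 : m.2 ≤ xs.length := by rw [hj0]; omega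
    refine ⟨m.1, m.2, ?_, ?_⟩
    · exact hf
    · rw [duplicate_frequency_alt, if_neg hne]
      simp only [pvFold_prefix']
      rw [hbv]
      have h := pvPfx_getD xs m.2 hm2
      rw [List.getD_eq_getElem?_getD] at h
      simp [h]

-- ===== VERDICT (by name: the statement is the Claim_ definition above) =====
theorem duplicate_frequency_spec : Claim_equal_duplicate_frequency := by
  intro xs hdom hpre
  unfold Spec_duplicate_frequency
  by_cases hne : xs = []
  · subst hne
    rfl
  · have hn : 1 ≤ xs.length := List.length_pos_iff.mpr hne
    obtain ⟨u, hcolu, hub⟩ := pvPre_col xs hne hpre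
    obtain ⟨T, hTmem, hTmin'⟩ := wellFounded_lt.has_min {v | pvCol xs v} ⟨u, hcolu⟩
    have hTmin : ∀ w, w < T → ¬ pvCol xs w := fun w hw hcw => hTmin' w hcw hw
    have hTu : T ≤ u := not_lt.mp (fun h => hTmin' u hcolu h)
    have hA := pvA_result xs hne T hTmem hTmin (le_trans hTu hub)
    obtain ⟨q, hq, hq0, hqt⟩ := pvCol_cand xs hne T hTmem
    obtain ⟨d, j, hmin, hBval⟩ := pvB_result xs hne q hq
    -- the minimal candidate (d, j)
    obtain ⟨j0, hj0mem, i0, hi0mem, hcand0, hj0⟩ := hmin.1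
    simp only at hj0
    subst hj0
    rw [List.mem_range'_1] at hj0mem
    rw [List.mem_range] at hi0mem
    have hjn : j ≤ xs.length := by omega
    have hin : i0 ≤ xs.length := by omega
    obtain ⟨hd0, hdiff, hdc⟩ := pvCand_sound xs j i0 hjn hin d hcand0
    -- T ≤ time of the minimal candidate
    have hcol := pvCand_col xs hne j i0 (by omega) hjn hin d hd0 hdiff hdc
    have hT_le : T ≤ d.toNat * xs.length + j :=
      not_lt.mp (fun h => hTmin' _ hcol h)
    -- time of the minimal candidate ≤ time of q ≤ T
    obtain ⟨jq, hjqmem, iq, hiqmem, hcandq, hjq⟩ := hq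
    rw [List.mem_range'_1] at hjqmem
    rw [List.mem_range] at hiqmem
    obtain ⟨hq0', hqdiff, hqdc⟩ := pvCand_sound xs jq iq (by omega) (by omega) q.1 hcandq
    have hnotlt : ¬ pvLexLt (q.1, q.2) (d, j) := by
      have := hmin.2 q
      rw [show (q.1, q.2) = q from rfl]
      exact this ⟨jq, by rw [List.mem_range'_1]; omega, iq, by rw [List.mem_range]; omega, hcandq, hjq⟩
    have hkey := pvKey_mono xs.length d q.1 j q.2 hd0 hq0 (by omega) hjn
      (by omega) (by omega) hnotlt
    have hTeq : T = d.toNat * xs.length + j := by omega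
    rw [hA, hBval, hTeq, pvV_form xs j hjn d.toNat, Int.toNat_of_nonneg hd0]
    ring
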